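-- pv_equiv track=rewrite | github.com/RANGSHOW/PythonStudy | Algorithm/프로그래머스/코딩테스트 연습/스택, 큐/.ipynb_checkpoints/기능개발-checkpoint.py | returnCompleList
-- ===== SOURCE A (Python) =====
-- def returnCompleList(progress, speeds):
--     compleList = []
--
--     for prog, speed in zip(progress, speeds):
--         cnt = 0
--         while prog < 100:
--             prog += speed
--             cnt += 1
--         compleList.append(cnt)
--     return compleList
-- ===== SOURCE B (Python) =====
-- def returnCompleList(progress, speeds):
--     return [0 if p >= 100 else -((p - 100) // s)
--             for p, s in zip(progress, speeds)]
-- ===== Notes on version B (the rewrite author's own statement) =====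
-- stated objective: alternative
-- what changed: Replaces the per-feature incremental while-loop (one iteration per day) with a closed-form ceiling division computed via Python floor division; intended as faster (A timed out at n=16 in a timing run where B returned, but no ratio could be measured).
import Mathlib
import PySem

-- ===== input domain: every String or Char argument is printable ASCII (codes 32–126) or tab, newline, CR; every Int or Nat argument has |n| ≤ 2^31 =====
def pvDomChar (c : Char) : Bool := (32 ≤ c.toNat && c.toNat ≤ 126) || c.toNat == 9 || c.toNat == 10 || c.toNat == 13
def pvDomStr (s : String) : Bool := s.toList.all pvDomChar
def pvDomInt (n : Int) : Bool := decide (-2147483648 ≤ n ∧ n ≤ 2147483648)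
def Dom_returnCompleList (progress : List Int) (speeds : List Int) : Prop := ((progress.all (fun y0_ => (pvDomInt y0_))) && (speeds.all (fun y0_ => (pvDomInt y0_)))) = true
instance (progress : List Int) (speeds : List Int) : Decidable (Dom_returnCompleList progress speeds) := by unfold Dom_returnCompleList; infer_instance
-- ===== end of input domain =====

-- B replaces A's day-by-day incremental while-loop with a closed-form ceiling division (one arithmetic step per feature instead of one per day).

-- ===== PORT A =====
-- the inner 'while prog < 100: prog += speed; cnt += 1' loop; the '0 < speed'
-- test only makes the recursion total (A diverges when speed ≤ 0 and prog < 100,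
-- which Pre_ excludes)
def pvCnt (prog : Int) (speed : Int) (cnt : Int) : Int :=
  if _h : prog < 100 ∧ 0 < speed then pvCnt (prog + speed) speed (cnt + 1) else cnt
termination_by (100 - prog).toNat
decreasing_by omega

def returnCompleList (progress : List Int) (speeds : List Int) : List Int :=
  (progress.zip speeds).foldl (fun compleList ps => compleList ++ [pvCnt ps.1 ps.2 0]) []

-- ===== PORT B =====
def returnCompleList_alt (progress : List Int) (speeds : List Int) : List Int :=
  (progress.zip speeds).map
    (fun ps => if ps.1 ≥ 100 then 0 else -(PySem.Int.floordiv (ps.1 - 100) ps.2))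

-- ===== PRECONDITION & SPEC =====
-- Pre_ excludes exactly the pairs on which A never returns: a feature with
-- progress < 100 and speed ≤ 0 makes A's while-loop run forever.
def Pre_returnCompleList (progress : List Int) (speeds : List Int) : Prop :=
  ∀ ps ∈ progress.zip speeds, 100 ≤ ps.1 ∨ 0 < ps.2
instance (progress : List Int) (speeds : List Int) : Decidable (Pre_returnCompleList progress speeds) := by unfold Pre_returnCompleList; infer_instance

def pvWitness_returnCompleList : List Int × List Int := ([93, 30, 55], [1, 30, 5])

def Spec_returnCompleList (progress : List Int) (speeds : List Int) (out : List Int) : Prop := out = returnCompleList_alt progress speeds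
instance (progress : List Int) (speeds : List Int) (out : List Int) : Decidable (Spec_returnCompleList progress speeds out) := by unfold Spec_returnCompleList; infer_instance

-- ===== CLAIM (what is proved, stated in full; the proofs are below) =====
def Claim_equal_returnCompleList : Prop := ∀ (progress : List Int) (speeds : List Int), Dom_returnCompleList progress speeds → Pre_returnCompleList progress speeds → Spec_returnCompleList progress speeds (returnCompleList progress speeds)

-- ===== LEMMAS AND PROOFS =====

-- the loop counter equals the ceiling ceil((100-p)/s) (written as -((p-100)//s)), offset by cnt
theorem pvCnt_closed (p s c : Int) (hs : 0 < s) :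
    pvCnt p s c = c + (if 100 ≤ p then 0 else -(PySem.Int.floordiv (p - 100) s)) := by
  by_cases hp : 100 ≤ p
  · rw [pvCnt]
    simp only [show ¬(p < 100 ∧ 0 < s) by omega, dite_false, if_pos hp]
    omega
  · have hlt : p < 100 := by omega
    rw [pvCnt]
    simp only [hlt, hs, and_self, dite_true]
    rw [pvCnt_closed (p + s) s (c + 1) hs]
    have h1 : p - 100 = -(100 - p) := by ring
    rw [h1, if_neg hp]
    by_cases h2 : 100 ≤ p + s
    · rw [if_pos h2]
      have : -(PySem.Int.floordiv (-(100 - p)) s) = 1 :=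
        (PySem.Int.neg_floordiv_neg_eq_iff_of_pos hs).mpr (by constructor <;> nlinarith)
      omega
    · rw [if_neg h2]
      have h3 : p + s - 100 = -(100 - (p + s)) := by ring
      rw [h3]
      set q := -(PySem.Int.floordiv (-(100 - (p + s))) s) with hq
      have hqb : (q - 1) * s < 100 - (p + s) ∧ 100 - (p + s) ≤ q * s :=
        (PySem.Int.neg_floordiv_neg_eq_iff_of_pos hs).mp hq.symm
      have : -(PySem.Int.floordiv (-(100 - p)) s) = q + 1 := by
        rw [PySem.Int.neg_floordiv_neg_eq_iff_of_pos hs]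
        constructor <;> nlinarith [hqb.1, hqb.2]
      omega
termination_by (100 - p).toNat
decreasing_by omega

theorem foldl_append_map {α β : Type} (f : α → β) :
    ∀ (l : List α) (acc : List β),
      l.foldl (fun a x => a ++ [f x]) acc = acc ++ l.map f := by
  intro l
  induction l with
  | nil => simp
  | cons x xs ih => intro acc; simp [List.foldl, ih]

-- ===== VERDICT (by name: the statement is the Claim_ definition above) =====
theorem returnCompleList_spec : Claim_equal_returnCompleList := by
  intro progress speeds _hdom hpre
  unfold Spec_returnCompleList returnCompleList returnCompleList_alt
  rw [foldl_append_map]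
  rw [List.nil_append]
  apply List.map_congr_left
  intro ps hps
  rcases hpre ps hps with h | h
  · rw [pvCnt]
    simp only [show ¬(ps.1 < 100 ∧ 0 < ps.2) by omega, dite_false, if_pos (by omega : ps.1 ≥ 100)]
  · rw [pvCnt_closed ps.1 ps.2 0 h]
    by_cases hp : 100 ≤ ps.1 <;> simp [hp, ge_iff_le]
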